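-- pv_equiv track=rewrite | github.com/xXJuanDavidXx/-Scripts-de-Automatizaci-n | Subnetting.py | operacion_and
-- ===== SOURCE A (Python) =====
-- def operacion_and(netmask, ip):
--     """
--     Función que identifica a qué red pertenece una dirección IP.
--
--     Args:
--         netmask : list => Lista de cadenas binarias que representan la máscara de red.
--         ip : list => Lista de cadenas binarias que representan la IP.
--
--     """
--     red = []
--
--     # Realiza la operación AND bit a bit
--     for byte1, byte2 in zip(netmask, ip):
--         octeto = ""
--         for bit1, bit2 in zip(byte1, byte2):
--             if bit1 == "1" and bit2 == "1":
--                 octeto += "1"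
--             else:
--                 octeto += "0"
--         red.append(octeto)
--
--     # Une los octetos con puntos para formar una dirección IP
--     return red
-- ===== SOURCE B (Python) =====
-- def operacion_and(netmask, ip):
--     """Bitwise AND of netmask and IP octet strings: intersect the positions of
--     the '1' bits in each pair of octets, then print the octet up to the common
--     length from that position set."""
--     red = []
--     for byte1, byte2 in zip(netmask, ip):
--         ones = ({i for i, c in enumerate(byte1) if c == "1"}
--                 & {i for i, c in enumerate(byte2) if c == "1"})
--         n = min(len(byte1), len(byte2))
--         red.append("".join("1" if i in ones else "0" for i in range(n)))
--     return red
-- ===== Notes on version B (the rewrite author's own statement) =====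
-- stated objective: alternative
-- what changed: Instead of building each octet character by character over zip(byte1, byte2), B collects the set of positions holding '1' in each octet, intersects the two sets, and renders the octet over range(min(len(byte1), len(byte2))) by membership in that intersection.
import Mathlib
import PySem

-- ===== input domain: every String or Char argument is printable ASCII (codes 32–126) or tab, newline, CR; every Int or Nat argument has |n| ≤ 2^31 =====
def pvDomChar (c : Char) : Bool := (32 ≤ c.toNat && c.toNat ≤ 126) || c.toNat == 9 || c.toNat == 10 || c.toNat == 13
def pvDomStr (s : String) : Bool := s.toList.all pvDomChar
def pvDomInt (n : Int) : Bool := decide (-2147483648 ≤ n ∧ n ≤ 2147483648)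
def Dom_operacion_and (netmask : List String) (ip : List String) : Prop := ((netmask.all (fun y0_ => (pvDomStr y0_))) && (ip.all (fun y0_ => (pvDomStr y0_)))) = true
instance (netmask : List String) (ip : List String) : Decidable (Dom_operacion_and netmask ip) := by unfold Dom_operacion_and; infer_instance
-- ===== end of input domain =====

-- B computes each octet by intersecting the sets of '1'-bit positions of the two
-- octet strings and rendering by membership, instead of A's per-character loop;
-- objective: alternative algorithm, same cost.

-- ===== PORT A =====
-- inner loop of A: octeto built character by character over zip(byte1, byte2)
def pvOctetA (cs1 cs2 : List Char) : List Char :=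
  (List.zip cs1 cs2).foldl
    (fun oct q => oct ++ [if q.1 = '1' ∧ q.2 = '1' then '1' else '0']) []

def operacion_and (netmask : List String) (ip : List String) : List String :=
  (List.zip netmask ip).foldl
    (fun red p => red ++ [String.mk (pvOctetA p.1.toList p.2.toList)]) []

-- ===== PORT B =====
-- {i for i, c in enumerate(byte) if c == "1"}
def pvOnes (s : String) : PySem.Set Int :=
  PySem.Set.ofList
    (((PySem.List.enumerate s.toList 0).filter (fun p => p.2 == '1')).map (fun p => p.1))

-- the ''.join of the one-character strings of the generator is the string of those characters
def operacion_and_alt (netmask : List String) (ip : List String) : List String :=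
  (List.zip netmask ip).foldl
    (fun red p =>
      let ones := PySem.Set.inter (pvOnes p.1) (pvOnes p.2)
      let n : Int := min (PySem.Str.len p.1) (PySem.Str.len p.2)
      red ++ [String.mk ((PySem.List.pyRange 0 n 1).map
        (fun i => if PySem.Set.contains ones i then '1' else '0'))]) []

-- ===== PRECONDITION & SPEC =====
def Spec_operacion_and (netmask : List String) (ip : List String) (out : List String) : Prop := out = operacion_and_alt netmask ip
instance (netmask : List String) (ip : List String) (out : List String) : Decidable (Spec_operacion_and netmask ip out) := by unfold Spec_operacion_and; infer_instance

-- ===== CLAIM (what is proved, stated in full; the proofs are below) =====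
def Claim_equal_operacion_and : Prop := ∀ (netmask : List String) (ip : List String), Dom_operacion_and netmask ip → Spec_operacion_and netmask ip (operacion_and netmask ip)

-- ===== LEMMAS AND PROOFS =====

-- a foldl that appends one element per item is a map
theorem pv_foldl_append_map {α β : Type} (f : α → β) :
    ∀ (l : List α) (acc : List β),
      l.foldl (fun a x => a ++ [f x]) acc = acc ++ l.map f := by
  intro l
  induction l with
  | nil => simp
  | cons x xs ih => intro acc; simp [List.foldl, ih]

-- membership in the '1'-position set of a string
theorem pv_mem_ones (s : String) (k : Nat) (hk : k < s.toList.length) :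
    (k : Int) ∈ pvOnes s ↔ s.toList[k] = '1' := by
  unfold pvOnes
  rw [PySem.Set.mem_ofList]
  constructor
  · intro h
    rcases List.mem_map.mp h with ⟨p, hp, hfst⟩
    rcases List.mem_filter.mp hp with ⟨hpe, hcond⟩
    rcases (PySem.List.mem_enumerate_iff _ _ _).mp hpe with ⟨j, hj, rfl⟩
    simp only [beq_iff_eq] at hcond
    have : j = k := by
      simp only [zero_add] at hfst
      exact_mod_cast hfst
    subst this
    simpa using hcond
  · intro h
    apply List.mem_map.mpr
    refine ⟨((0 : Int) + k, s.toList[k]), ?_, by simp⟩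
    apply List.mem_filter.mpr
    refine ⟨?_, by simpa using h⟩
    exact (PySem.List.mem_enumerate_iff _ _ _).mpr ⟨k, hk, rfl⟩

-- per-octet agreement: A's character loop equals B's membership rendering
theorem pv_elem (s1 s2 : String) :
    String.mk (pvOctetA s1.toList s2.toList) =
      String.mk ((PySem.List.pyRange 0 (min (PySem.Str.len s1) (PySem.Str.len s2)) 1).map
        (fun i => if PySem.Set.contains (PySem.Set.inter (pvOnes s1) (pvOnes s2)) i
                  then '1' else '0')) := by
  apply congrArg String.mk
  have hA : pvOctetA s1.toList s2.toList =
      (List.zip s1.toList s2.toList).map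
        (fun q => if q.1 = '1' ∧ q.2 = '1' then '1' else '0') := by
    unfold pvOctetA
    rw [pv_foldl_append_map]
    simp
  rw [hA]
  have hlen : (min (PySem.Str.len s1) (PySem.Str.len s2) - 0).toNat =
      min s1.toList.length s2.toList.length := by
    simp only [PySem.Str.len_eq, String.length_toList]
    omega
  apply List.ext_getElem
  · simp only [List.length_map, List.length_zip, PySem.List.length_pyRange_one, hlen]
  · intro k h1 h2
    have h1' : k < min s1.toList.length s2.toList.length := by
      simpa only [List.length_map, List.length_zip] using h1
    have hk1 : k < s1.toList.length := by omega
    have hk2 : k < s2.toList.length := by omega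
    have hkr : k < (PySem.List.pyRange 0 (min (PySem.Str.len s1) (PySem.Str.len s2)) 1).length := by
      simpa using h2
    rw [List.getElem_map, List.getElem_map, List.getElem_zip,
      PySem.List.getElem_pyRange_one]
    simp only [zero_add]
    have hmem : PySem.Set.contains (PySem.Set.inter (pvOnes s1) (pvOnes s2)) (k : Int) = true ↔
        (s1.toList[k] = '1' ∧ s2.toList[k] = '1') := by
      rw [PySem.Set.contains_iff, PySem.Set.mem_inter,
        pv_mem_ones s1 k hk1, pv_mem_ones s2 k hk2]
    by_cases hb : s1.toList[k] = '1' ∧ s2.toList[k] = '1'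
    · rw [if_pos hb, if_pos (hmem.mpr hb)]
    · rw [if_neg hb, if_neg (fun hc => hb (hmem.mp hc))]

-- ===== VERDICT (by name: the statement is the Claim_ definition above) =====
theorem operacion_and_spec : Claim_equal_operacion_and := by
  intro netmask ip _
  unfold Spec_operacion_and operacion_and operacion_and_alt
  rw [pv_foldl_append_map, pv_foldl_append_map]
  simp only [List.nil_append]
  apply List.map_congr_left
  intro p _
  exact pv_elem p.1 p.2
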